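-- pv_equiv track=rewrite | github.com/gali1998/ExtendedIntroToCSHomework | 3/bar.py | bar_inv_cycle
-- ===== SOURCE A (Python) =====
-- def bar_inv_cycle(n):
--
--     lst = [[] for i in range(n)]
--
--     for i in range(n):
--         for j in range(n):
--
--             if i != 0:
--                 if (j == (i**(n-2)) % n) or (j == i + 1 or j == i - 1):
--                     lst[i].append(1)
--                 else:
--                     lst[i].append(0)
--
--             else:
--                 if j == 0 or j == 1 or j == n-1:
--                     lst[0].append(1)
--                 else:
--                     lst[0].append(0)
--
--
--     lst[n-1][0] = 1
--
--     return lst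
-- ===== SOURCE B (Python) =====
-- def bar_inv_cycle(n):
--     rows = []
--     for i in range(n):
--         row = [0] * n
--         if i == 0:
--             row[0] = 1
--             if n > 1:
--                 row[1] = 1
--             row[n - 1] = 1
--         else:
--             row[i - 1] = 1
--             if i + 1 < n:
--                 row[i + 1] = 1
--             row[pow(i, n - 2, n)] = 1
--         rows.append(row)
--     rows[n - 1][0] = 1
--     return rows
-- ===== Notes on version B (the rewrite author's own statement) =====
-- stated objective: faster
-- what changed: B builds each row as a zero row and writes the at-most-three 1s directly at positions i-1, i+1 and pow(i, n-2, n) (computed once per row by modular exponentiation), instead of scanning all n columns and recomputing the full bignum i**(n-2) for every cell as A does.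
import Mathlib
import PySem

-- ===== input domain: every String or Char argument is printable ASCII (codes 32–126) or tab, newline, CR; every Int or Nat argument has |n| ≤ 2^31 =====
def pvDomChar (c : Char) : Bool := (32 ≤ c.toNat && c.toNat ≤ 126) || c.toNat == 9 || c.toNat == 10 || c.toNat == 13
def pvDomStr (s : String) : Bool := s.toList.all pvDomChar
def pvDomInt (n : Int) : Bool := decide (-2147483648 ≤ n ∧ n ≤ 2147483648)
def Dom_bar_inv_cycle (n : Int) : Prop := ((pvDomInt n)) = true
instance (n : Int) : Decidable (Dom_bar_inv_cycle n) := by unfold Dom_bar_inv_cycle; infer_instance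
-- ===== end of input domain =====

-- B builds each row as a zero row and writes the (at most three) 1s directly, with one
-- modular power per row, instead of scanning all n columns with a bignum power per cell
-- (objective: faster).

-- ===== PORT A =====
-- the nested i/j loops of A: row i is filled cell by cell, each cell recomputing i^(n-2) % n
def pvRowsA (n : Int) : List (List Int) :=
  (PySem.List.pyRange 0 n 1).foldl (fun lst i =>
    lst ++ [(PySem.List.pyRange 0 n 1).foldl (fun row j =>
      if i ≠ 0 then
        if j = PySem.Int.mod (i ^ (n - 2).toNat) n ∨ (j = i + 1 ∨ j = i - 1) then
          row ++ [1]
        else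
          row ++ [0]
      else
        if j = 0 ∨ j = 1 ∨ j = n - 1 then
          row ++ [1]
        else
          row ++ [0]) []]) []

def bar_inv_cycle (n : Int) : List (List Int) :=
  -- lst[n-1][0] = 1  (n - 1 ≥ 0 under Pre_, so the Python index is non-negative)
  (pvRowsA n).set (n - 1).toNat (((pvRowsA n).getD (n - 1).toNat []).set 0 1)

-- ===== PORT B =====
-- B's loop: row = [0]*n, then the 1s are written in place (one modular power per row)
def pvRowsB (n : Int) : List (List Int) :=
  (PySem.List.pyRange 0 n 1).foldl (fun rows i =>
    let row := List.replicate n.toNat (0 : Int)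
    let row :=
      if i = 0 then
        let r1 := row.set 0 1
        let r2 := if 1 < n then r1.set 1 1 else r1
        r2.set (n - 1).toNat 1
      else
        let r1 := row.set (i - 1).toNat 1
        let r2 := if i + 1 < n then r1.set (i + 1).toNat 1 else r1
        r2.set (PySem.Int.powMod i (n - 2).toNat n).toNat 1
    rows ++ [row]) []

def bar_inv_cycle_alt (n : Int) : List (List Int) :=
  (pvRowsB n).set (n - 1).toNat (((pvRowsB n).getD (n - 1).toNat []).set 0 1)

-- ===== PRECONDITION & SPEC =====
-- Pre_ excludes exactly n ≤ 0, on which A raises IndexError (lst[n-1] on an empty list).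
def Pre_bar_inv_cycle (n : Int) : Prop := 1 ≤ n
instance (n : Int) : Decidable (Pre_bar_inv_cycle n) := by unfold Pre_bar_inv_cycle; infer_instance
def pvWitness_bar_inv_cycle : Int := 3
def Spec_bar_inv_cycle (n : Int) (out : List (List Int)) : Prop := out = bar_inv_cycle_alt n
instance (n : Int) (out : List (List Int)) : Decidable (Spec_bar_inv_cycle n out) := by unfold Spec_bar_inv_cycle; infer_instance

-- ===== CLAIM (what is proved, stated in full; the proofs are below) =====
def Claim_equal_bar_inv_cycle : Prop := ∀ (n : Int), Dom_bar_inv_cycle n → Pre_bar_inv_cycle n → Spec_bar_inv_cycle n (bar_inv_cycle n)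

-- ===== LEMMAS AND PROOFS =====

-- row 0 of A (a scan over j) equals row 0 of B (a zero row with 1s written at 0, 1, n-1)
theorem pv_row0_eq (n : Int) (hn : 1 ≤ n) :
    (PySem.List.pyRange 0 n 1).foldl (fun row j =>
      if j = 0 ∨ j = 1 ∨ j = n - 1 then row ++ [1] else row ++ [0]) ([] : List Int) =
    (let r1 := (List.replicate n.toNat (0 : Int)).set 0 1
     let r2 := if 1 < n then r1.set 1 1 else r1
     r2.set (n - 1).toNat 1) := by
  have h : (fun (row : List Int) (j : Int) =>
        if j = 0 ∨ j = 1 ∨ j = n - 1 then row ++ [1] else row ++ [0])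
      = fun row j => row ++ [if j = 0 ∨ j = 1 ∨ j = n - 1 then (1 : Int) else 0] := by
    funext row j; split <;> rfl
  rw [h, PySem.List.foldl_append_singleton_eq_map]
  simp only [List.nil_append]
  by_cases h1 : 1 < n <;>
  · simp only [h1, if_true, if_false]
    apply List.ext_getElem
    · simp [PySem.List.length_pyRange_one]
    · intro k hk hk'
      have hkn : (k : Int) < n := by
        simp only [List.length_map, PySem.List.length_pyRange_one] at hk; omega
      simp only [List.getElem_map, PySem.List.getElem_pyRange_one, List.getElem_set,
        List.getElem_replicate, zero_add]
      split_ifs <;> omega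

-- row i ≥ 1 of A equals row i of B: one modular power, 1s written at i-1, i+1, that power
theorem pv_rowi_eq (n i : Int) (hi0 : 0 ≤ i) (hin : i < n) (hi : i ≠ 0) :
    (PySem.List.pyRange 0 n 1).foldl (fun row j =>
      if j = PySem.Int.mod (i ^ (n - 2).toNat) n ∨ (j = i + 1 ∨ j = i - 1) then
        row ++ [1] else row ++ [0]) ([] : List Int) =
    (let r1 := (List.replicate n.toNat (0 : Int)).set (i - 1).toNat 1
     let r2 := if i + 1 < n then r1.set (i + 1).toNat 1 else r1
     r2.set (PySem.Int.powMod i (n - 2).toNat n).toNat 1) := by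
  have hn : 0 < n := lt_of_le_of_lt hi0 hin
  have h : (fun (row : List Int) (j : Int) =>
        if j = PySem.Int.mod (i ^ (n - 2).toNat) n ∨ (j = i + 1 ∨ j = i - 1) then
          row ++ [1] else row ++ [0])
      = fun row j => row ++ [if j = PySem.Int.mod (i ^ (n - 2).toNat) n ∨ (j = i + 1 ∨ j = i - 1)
          then (1 : Int) else 0] := by
    funext row j; split <;> rfl
  rw [h, PySem.List.foldl_append_singleton_eq_map]
  simp only [List.nil_append, PySem.Int.powMod_eq]
  have hp0 : 0 ≤ PySem.Int.mod (i ^ (n - 2).toNat) n := PySem.Int.mod_nonneg _ hn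
  have hpn : PySem.Int.mod (i ^ (n - 2).toNat) n < n := PySem.Int.mod_lt _ hn
  generalize hP : PySem.Int.mod (i ^ (n - 2).toNat) n = p at *
  by_cases h1 : i + 1 < n <;>
  · simp only [h1, if_true, if_false]
    apply List.ext_getElem
    · simp [PySem.List.length_pyRange_one]
    · intro k hk hk'
      have hkn : (k : Int) < n := by
        simp only [List.length_map, PySem.List.length_pyRange_one] at hk; omega
      simp only [List.getElem_map, PySem.List.getElem_pyRange_one, List.getElem_set,
        List.getElem_replicate, zero_add]
      split_ifs <;> omega

theorem pv_rows_eq (n : Int) : pvRowsA n = pvRowsB n := by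
  unfold pvRowsA pvRowsB
  apply PySem.List.foldl_congr_mem
  intro acc i hi
  rw [PySem.List.mem_pyRange_one] at hi
  by_cases h0 : i = 0
  · subst h0
    simp only [ne_eq, not_true_eq_false, if_false, if_true]
    exact congrArg (fun r => acc ++ [r]) (pv_row0_eq n (by omega))
  · simp only [ne_eq, h0, not_false_eq_true, if_true, if_false]
    exact congrArg (fun r => acc ++ [r]) (pv_rowi_eq n i hi.1 hi.2 h0)

-- ===== VERDICT (by name: the statement is the Claim_ definition above) =====
theorem bar_inv_cycle_spec : Claim_equal_bar_inv_cycle := by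
  intro n _ _
  unfold Spec_bar_inv_cycle bar_inv_cycle bar_inv_cycle_alt
  rw [pv_rows_eq n]
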